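-- pv_equiv track=rewrite | github.com/pypi-data/pypi-mirror-375 | packages/nova-ci-rescue/nova_ci_rescue-1.1.0.tar.gz/nova_ci_rescue-1.1.0/src/nova/runner/test_runner.py | _shorten_traceback
-- ===== SOURCE A (Python) =====
-- from typing import List, Optional, Dict, Any, Tuple
--
-- def _shorten_traceback(lines: List[str]) -> str:
--     out: List[str] = []
--     for ln in lines:
--         out.append(ln)
--         if ln.strip().startswith("E "):  # error line
--             break
--         if len(out) >= 5:
--             break
--     return "\n".join(out) if out else "Test failed"
-- ===== SOURCE B (Python) =====
-- from typing import List
--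
-- def _shorten_traceback(lines: List[str]) -> str:
--     idx = next((i for i, ln in enumerate(lines) if ln.strip().startswith("E ")), None)
--     end = 5 if idx is None else min(5, idx + 1)
--     out = lines[:end]
--     return "\n".join(out) if out else "Test failed"
-- ===== Notes on version B (the rewrite author's own statement) =====
-- stated objective: simpler
-- what changed: Replaces the accumulate-and-break loop with locate-the-first-error-index-then-single-slice: find the first line whose strip() starts with 'E ', cap at min(5, idx+1), and take one slice.
import Mathlib
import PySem

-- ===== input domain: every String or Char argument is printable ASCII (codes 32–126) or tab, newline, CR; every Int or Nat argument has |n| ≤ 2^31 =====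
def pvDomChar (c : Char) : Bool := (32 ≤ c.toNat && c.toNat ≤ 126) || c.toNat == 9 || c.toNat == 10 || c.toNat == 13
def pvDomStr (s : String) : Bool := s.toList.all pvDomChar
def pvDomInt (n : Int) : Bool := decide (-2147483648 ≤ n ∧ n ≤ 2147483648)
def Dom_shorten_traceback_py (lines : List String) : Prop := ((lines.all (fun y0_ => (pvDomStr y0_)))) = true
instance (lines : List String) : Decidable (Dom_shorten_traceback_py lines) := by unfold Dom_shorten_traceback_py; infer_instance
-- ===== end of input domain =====

-- B replaces A's accumulate-and-break loop by locate-first-error-index then one slice (objective: simpler).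

-- ===== PORT A =====
-- A's loop: append ln to out, break on error line, break when len(out) >= 5
def pvLoopA (out : List String) (rest : List String) : List String :=
  match rest with
  | [] => out
  | ln :: rest' =>
    let out' := out ++ [ln]
    if PySem.Str.startswith (PySem.Str.strip ln) "E " then out'
    else if 5 ≤ out'.length then out'
    else pvLoopA out' rest'

def shorten_traceback_py (lines : List String) : String :=
  let out := pvLoopA [] lines
  if out ≠ [] then PySem.Str.join "\n" out else "Test failed"

-- ===== PORT B =====
def shorten_traceback_py_alt (lines : List String) : String :=
  -- next((i for i, ln in enumerate(lines) if ln.strip().startswith("E ")), None)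
  let idx : Option Int := (PySem.List.enumerate lines 0).findSome?
    (fun p => if PySem.Str.startswith (PySem.Str.strip p.2) "E " then some p.1 else none)
  let e : Int := match idx with | none => 5 | some i => min 5 (i + 1)
  let out := PySem.List.slice lines none (some e)
  if out ≠ [] then PySem.Str.join "\n" out else "Test failed"

-- ===== PRECONDITION & SPEC =====
def Spec_shorten_traceback_py (lines : List String) (out : String) : Prop := out = shorten_traceback_py_alt lines
instance (lines : List String) (out : String) : Decidable (Spec_shorten_traceback_py lines out) := by unfold Spec_shorten_traceback_py; infer_instance

-- ===== CLAIM (what is proved, stated in full; the proofs are below) =====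
def Claim_equal_shorten_traceback_py : Prop := ∀ (lines : List String), Dom_shorten_traceback_py lines → Spec_shorten_traceback_py lines (shorten_traceback_py lines)

-- ===== LEMMAS AND PROOFS =====

-- the error-line predicate, abbreviation for the proofs
def pvErr (ln : String) : Bool := PySem.Str.startswith (PySem.Str.strip ln) "E "

-- cap rest = index-after-first-error, or the whole length if no error line
def pvCap (rest : List String) : Nat :=
  match rest.findIdx? pvErr with
  | some i => i + 1
  | none => rest.length

lemma pvCap_cons_pos (ln : String) (r : List String) (h : pvErr ln = true) :
    pvCap (ln :: r) = 1 := by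
  simp [pvCap, List.findIdx?_cons, h]

lemma pvCap_cons_neg (ln : String) (r : List String) (h : pvErr ln = false) :
    pvCap (ln :: r) = pvCap r + 1 := by
  unfold pvCap
  simp only [List.findIdx?_cons, h, Bool.false_eq_true, if_false]
  cases hr : r.findIdx? pvErr with
  | none => simp [List.length_cons]
  | some i => simp

-- A's loop invariant: with out.length < 5 it returns out ++ the capped prefix of rest
lemma pvLoopA_eq : ∀ (rest out : List String), out.length < 5 →
    pvLoopA out rest = out ++ rest.take (min (5 - out.length) (pvCap rest)) := by
  intro rest
  induction rest with
  | nil => intro out h; simp [pvLoopA, pvCap]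
  | cons ln r ih =>
    intro out h
    by_cases he : pvErr ln = true
    · have hc := pvCap_cons_pos ln r he
      have hn : min (5 - out.length) (pvCap (ln :: r)) = 1 := by rw [hc]; omega
      have heS : PySem.Str.startswith (PySem.Str.strip ln) "E " = true := he
      simp only [pvLoopA, heS, if_true, hn]
      simp
    · have he' : pvErr ln = false := by simpa using he
      have hc := pvCap_cons_neg ln r he'
      have heS : PySem.Str.startswith (PySem.Str.strip ln) "E " = false := he'
      have hlen : (out ++ [ln]).length = out.length + 1 := by simp
      simp only [pvLoopA, heS, Bool.false_eq_true, if_false]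
      by_cases h5 : 5 ≤ (out ++ [ln]).length
      · have hn : min (5 - out.length) (pvCap (ln :: r)) = 1 := by rw [hc]; omega
        rw [if_pos h5, hn]
        simp
      · rw [if_neg h5, ih (out ++ [ln]) (by omega)]
        have hpos : 1 ≤ min (5 - out.length) (pvCap (ln :: r)) := by rw [hc]; omega
        obtain ⟨k, hk⟩ : ∃ k, min (5 - out.length) (pvCap (ln :: r)) = k + 1 :=
          ⟨min (5 - out.length) (pvCap (ln :: r)) - 1, by omega⟩
        have harith : min (5 - (out ++ [ln]).length) (pvCap r) = k := by
          rw [hlen]; omega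
        rw [harith, hk, List.take_succ_cons]
        simp

-- B's index search over enumerate equals findIdx?, shifted by the start
lemma pvFindSome_enum : ∀ (lines : List String) (s : Int),
    (PySem.List.enumerate lines s).findSome?
      (fun p => if PySem.Str.startswith (PySem.Str.strip p.2) "E " then some p.1 else none)
    = (lines.findIdx? pvErr).map (fun i : Nat => s + (i : Int)) := by
  intro lines
  induction lines with
  | nil => intro s; simp [PySem.List.enumerate_nil]
  | cons ln r ih =>
    intro s
    rw [PySem.List.enumerate_cons, List.findSome?_cons, List.findIdx?_cons]
    by_cases he : pvErr ln = true
    · have heS : PySem.Str.startswith (PySem.Str.strip ln) "E " = true := he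
      simp only [heS, he, if_true]
      simp
    · have he' : pvErr ln = false := by simpa using he
      have heS : PySem.Str.startswith (PySem.Str.strip ln) "E " = false := he'
      simp only [heS, he', Bool.false_eq_true, if_false]
      rw [ih (s + 1)]
      cases hr : r.findIdx? pvErr with
      | none => simp
      | some i =>
        simp
        try omega

-- the two result lists coincide
lemma pvLists_eq (lines : List String) :
    pvLoopA [] lines
      = PySem.List.slice lines none
          (some (match (PySem.List.enumerate lines 0).findSome?
              (fun p => if PySem.Str.startswith (PySem.Str.strip p.2) "E " then some p.1 else none) with
            | none => (5 : Int)
            | some i => min 5 (i + 1))) := by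
  rw [pvLoopA_eq lines [] (by simp), pvFindSome_enum lines 0]
  simp only [List.nil_append, List.length_nil, Nat.sub_zero]
  cases hf : lines.findIdx? pvErr with
  | none =>
    have hcap : pvCap lines = lines.length := by simp [pvCap, hf]
    simp only [Option.map_none]
    rw [PySem.List.slice_to lines (by norm_num : (0:ℤ) ≤ (5:ℤ)), hcap]
    have h5 : ((5:Int)).toNat = 5 := rfl
    rw [h5, ← List.take_take, List.take_length]
  | some i =>
    have hcap : pvCap lines = i + 1 := by simp [pvCap, hf]
    simp only [Option.map_some]
    rw [hcap]
    have he : (min (5:Int) (0 + (i:Int) + 1)) = ((min 5 (i+1) : Nat) : Int) := by push_cast; omega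
    rw [he, PySem.List.slice_to_natCast]

-- ===== VERDICT (by name: the statement is the Claim_ definition above) =====
theorem shorten_traceback_py_spec : Claim_equal_shorten_traceback_py := by
  intro lines _
  unfold Spec_shorten_traceback_py shorten_traceback_py shorten_traceback_py_alt
  rw [pvLists_eq lines]
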